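-- pv_equiv track=rewrite | github.com/mbachelier1/cours_mkdocs | wip/alignement_fred.py | aligne_str_dyn
-- ===== SOURCE A (Python) =====
-- def compte_tirets(w1, w2):
--     resultat = 0
--     for lettre in w1:
--         if lettre == '-':
--             resultat += 1
--     for lettre in w2:
--         if lettre == '-':
--             resultat += 1
--     return resultat
--
-- def aligne_str_dyn(w1: str, w2: str):
--     if (w1, w2) in d:
--         return d[w1, w2]
--     elif not w1 or not w2:
--         s = len(w1) * '-', len(w2) * '-'
--     elif w1[0] == w2[0]:
--         s1, s2 = aligne_str_dyn(w1[1:], w2[1:])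
--         s = w1[0] + s1, w2[0] + s2
--     else:
--         s1, s2 = aligne_str_dyn(w1, w2[1:])
--         s3, s4 = aligne_str_dyn(w1[1:], w2)
--         if compte_tirets(s1, s2) < compte_tirets(s3, s4):
--             s = '-' + s1, w2[0] + s2
--         else:
--             s = w1[0] + s3, '-' + s4
--     d[w1, w2] = s
--     return s
--
-- d = dict()
-- ===== SOURCE B (Python) =====
-- def aligne_str_dyn(w1: str, w2: str):
--     # Bottom-up DP over suffixes; each cell stores (s1, s2, dash_count) so the
--     # comparison is O(1) instead of rescanning both strings.
--     n, m = len(w1), len(w2)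
--     prev = [None] * (m + 1)
--     prev[m] = ('', '', 0)
--     for j in range(m - 1, -1, -1):
--         s1, s2, c = prev[j + 1]
--         prev[j] = ('', '-' + s2, c + 1)
--     for i in range(n - 1, -1, -1):
--         a = w1[i]
--         cur = [None] * (m + 1)
--         s1, s2, c = prev[m]
--         cur[m] = ('-' + s1, '', c + 1)
--         for j in range(m - 1, -1, -1):
--             b = w2[j]
--             if a == b:
--                 s1, s2, c = prev[j + 1]
--                 cur[j] = (a + s1, b + s2, c + (2 if a == '-' else 0))
--             else:
--                 t1, t2, c1 = cur[j + 1]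
--                 u1, u2, c2 = prev[j]
--                 if c1 < c2:
--                     cur[j] = ('-' + t1, b + t2, c1 + 1 + (b == '-'))
--                 else:
--                     cur[j] = (a + u1, '-' + u2, c2 + 1 + (a == '-'))
--         prev = cur
--     s1, s2, _ = prev[0]
--     return s1, s2
-- ===== Notes on version B (the rewrite author's own statement) =====
-- stated objective: faster
-- what changed: Replaced A's memoized top-down recursion, which rescans both result strings with compte_tirets at every mismatch decision, with a bottom-up suffix DP whose cells carry the dash count, making each comparison O(1) and avoiding recursion and string slicing.
import Mathlib
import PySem

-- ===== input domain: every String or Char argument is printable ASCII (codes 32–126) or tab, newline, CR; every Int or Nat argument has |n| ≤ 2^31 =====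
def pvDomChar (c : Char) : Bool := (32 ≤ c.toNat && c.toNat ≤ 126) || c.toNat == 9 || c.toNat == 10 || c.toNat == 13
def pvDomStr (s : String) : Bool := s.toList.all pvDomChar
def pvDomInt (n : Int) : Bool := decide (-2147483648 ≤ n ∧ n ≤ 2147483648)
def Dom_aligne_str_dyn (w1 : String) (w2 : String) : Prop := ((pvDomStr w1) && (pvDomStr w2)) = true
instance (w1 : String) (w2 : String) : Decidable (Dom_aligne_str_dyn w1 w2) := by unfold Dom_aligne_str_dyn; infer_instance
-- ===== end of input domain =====

-- B replaces A's memoized top-down recursion (which rescans both result strings to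
-- count dashes at every mismatch) with a bottom-up suffix DP whose cells carry the
-- dash count, so each comparison is O(1); return values are identical.
-- A's global memo dict only caches deterministic results, so A is ported as the
-- underlying recursion on the two strings (value-faithful; small inputs only).

-- ===== PORT A =====
-- compte_tirets: two counting loops over the pair of strings (on List Char).
def compteLoop (r : Int) (l : List Char) : Int :=
  l.foldl (fun acc c => if c = '-' then acc + 1 else acc) r

def compte_tirets (s1 s2 : List Char) : Int :=
  compteLoop (compteLoop 0 s1) s2

-- the memoized recursion of A, minus the (purely caching) memo dict
def alignACore : List Char → List Char → List Char × List Char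
  | [], w2 => ([], List.replicate w2.length '-')
  | a :: t1, [] => (List.replicate (a :: t1).length '-', [])
  | a :: t1, b :: t2 =>
    if a = b then
      let s := alignACore t1 t2
      (a :: s.1, b :: s.2)
    else
      let p := alignACore (a :: t1) t2
      let q := alignACore t1 (b :: t2)
      if compte_tirets p.1 p.2 < compte_tirets q.1 q.2 then
        ('-' :: p.1, b :: p.2)
      else
        (a :: q.1, '-' :: q.2)
termination_by w1 w2 => w1.length + w2.length

def aligne_str_dyn (w1 : String) (w2 : String) : String × String :=
  let s := alignACore w1.toList w2.toList
  (String.ofList s.1, String.ofList s.2)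

-- ===== PORT B =====
-- row for i = n (w1 suffix empty), built from j = m down to 0
def baseRowB : List Char → List (List Char × List Char × Int)
  | [] => [([], [], 0)]
  | _ :: t2 =>
    let r := baseRowB t2
    match r with
    | q :: _ => ([], '-' :: q.2.1, q.2.2 + 1) :: r
    | [] => []

-- one step of the outer loop: build the row for i from the row for i+1 (prev),
-- from j = m down to 0
def stepRowB (a : Char) : List Char → List (List Char × List Char × Int) → List (List Char × List Char × Int)
  | [], prev =>
    match prev with
    | [p] => [('-' :: p.1, [], p.2.2 + 1)]
    | _ => []
  | b :: t2, prev =>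
    match prev with
    | p :: ps =>
      let qs := stepRowB a t2 ps
      match ps, qs with
      | pd :: _, q :: _ =>
        (if a = b then (a :: pd.1, b :: pd.2.1, pd.2.2 + (if a = '-' then 2 else 0))
         else if q.2.2 < p.2.2 then ('-' :: q.1, b :: q.2.1, q.2.2 + 1 + (if b = '-' then 1 else 0))
         else (a :: p.1, '-' :: p.2.1, p.2.2 + 1 + (if a = '-' then 1 else 0))) :: qs
      | _, _ => []
    | [] => []

def tableB : List Char → List Char → List (List Char × List Char × Int)
  | [], w2 => baseRowB w2
  | a :: t1, w2 => stepRowB a w2 (tableB t1 w2)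

def aligne_str_dyn_alt (w1 : String) (w2 : String) : String × String :=
  match tableB w1.toList w2.toList with
  | e :: _ => (String.ofList e.1, String.ofList e.2.1)
  | [] => ("", "")

-- ===== PRECONDITION & SPEC =====
def Spec_aligne_str_dyn (w1 : String) (w2 : String) (out : String × String) : Prop := out = aligne_str_dyn_alt w1 w2
instance (w1 : String) (w2 : String) (out : String × String) : Decidable (Spec_aligne_str_dyn w1 w2 out) := by unfold Spec_aligne_str_dyn; infer_instance

-- ===== CLAIM (what is proved, stated in full; the proofs are below) =====
def Claim_equal_aligne_str_dyn : Prop := ∀ (w1 : String) (w2 : String), Dom_aligne_str_dyn w1 w2 → Spec_aligne_str_dyn w1 w2 (aligne_str_dyn w1 w2)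

-- ===== LEMMAS AND PROOFS =====
def packE (p : List Char × List Char) : List Char × List Char × Int :=
  (p.1, p.2, compte_tirets p.1 p.2)

lemma compteLoop_eq (r : Int) (l : List Char) :
    compteLoop r l = r + (l.countP (fun c => c = '-') : Int) := by
  induction l generalizing r with
  | nil => simp [compteLoop]
  | cons c t ih =>
    have hc : compteLoop r (c :: t) = compteLoop (if c = '-' then r + 1 else r) t := rfl
    rw [hc, ih, List.countP_cons]
    by_cases h : c = '-' <;> simp [h] <;> push_cast <;> ring

lemma compte_eq (s1 s2 : List Char) :
    compte_tirets s1 s2 = (s1.countP (fun c => c = '-') : Int) + (s2.countP (fun c => c = '-') : Int) := by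
  simp [compte_tirets, compteLoop_eq]

lemma compte_cons_left (a : Char) (s1 s2 : List Char) :
    compte_tirets (a :: s1) s2 = (if a = '-' then 1 else 0) + compte_tirets s1 s2 := by
  simp only [compte_eq, List.countP_cons]
  by_cases h : a = '-' <;> simp [h] <;> push_cast <;> ring

lemma compte_cons_right (b : Char) (s1 s2 : List Char) :
    compte_tirets s1 (b :: s2) = (if b = '-' then 1 else 0) + compte_tirets s1 s2 := by
  simp only [compte_eq, List.countP_cons]
  by_cases h : b = '-' <;> simp [h] <;> push_cast <;> ring

lemma compte_replicate_left (n : Nat) : compte_tirets (List.replicate n '-') [] = n := by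
  simp [compte_eq, List.countP_replicate]

lemma compte_replicate_right (n : Nat) : compte_tirets [] (List.replicate n '-') = n := by
  simp [compte_eq, List.countP_replicate]

lemma alignACore_nil_right (t1 : List Char) :
    alignACore t1 [] = (List.replicate t1.length '-', []) := by
  cases t1 <;> simp [alignACore]

lemma tails_map_head {α β : Type} (f : List α → β) (l : List α) :
    ∃ r, (List.tails l).map f = f l :: r := by
  cases l <;> simp [List.tails]

lemma baseRowB_eq (w2 : List Char) :
    baseRowB w2 = (List.tails w2).map (fun s => packE (alignACore [] s)) := by
  induction w2 with
  | nil => simp [baseRowB, packE, alignACore, compte_tirets, compteLoop]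
  | cons b t2 ih =>
    obtain ⟨r, hr⟩ := tails_map_head (fun s => packE (alignACore [] s)) t2
    rw [List.tails_cons, List.map_cons]
    simp only [baseRowB]
    rw [ih, hr]
    simp only []
    congr 1
    simp only [packE, alignACore, compte_replicate_right]
    refine Prod.ext rfl (Prod.ext ?_ ?_)
    · simp [List.replicate_succ]
    · simp

lemma stepRowB_eq (a : Char) (t1 : List Char) (w2 : List Char) :
    stepRowB a w2 ((List.tails w2).map (fun s => packE (alignACore t1 s)))
      = (List.tails w2).map (fun s => packE (alignACore (a :: t1) s)) := by
  induction w2 with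
  | nil =>
    simp only [List.tails, List.map_cons, List.map_nil, stepRowB]
    rw [alignACore_nil_right t1, alignACore_nil_right (a :: t1)]
    simp only [packE, compte_replicate_left, List.length_cons, List.replicate_succ]
    refine congrArg (fun x => [x]) (Prod.ext rfl (Prod.ext rfl ?_))
    simp [compte_cons_left, compte_replicate_left]; push_cast; ring
  | cons b t2 ih =>
    obtain ⟨r, hr⟩ := tails_map_head (fun s => packE (alignACore t1 s)) t2
    obtain ⟨r', hr'⟩ := tails_map_head (fun s => packE (alignACore (a :: t1) s)) t2
    rw [List.tails_cons, List.map_cons, List.map_cons]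
    simp only [stepRowB]
    rw [ih, hr, hr']
    simp only []
    congr 1
    by_cases hab : a = b
    · subst hab
      have hA : alignACore (a :: t1) (a :: t2) =
          (a :: (alignACore t1 t2).1, a :: (alignACore t1 t2).2) := by
        rw [alignACore]; simp
      rw [if_pos rfl, hA]
      simp only [packE, compte_cons_left, compte_cons_right]
      refine Prod.ext rfl (Prod.ext rfl ?_)
      split <;> ring
    · have hA : alignACore (a :: t1) (b :: t2) =
        (if compte_tirets (alignACore (a :: t1) t2).1 (alignACore (a :: t1) t2).2
            < compte_tirets (alignACore t1 (b :: t2)).1 (alignACore t1 (b :: t2)).2 then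
          ('-' :: (alignACore (a :: t1) t2).1, b :: (alignACore (a :: t1) t2).2)
        else
          (a :: (alignACore t1 (b :: t2)).1, '-' :: (alignACore t1 (b :: t2)).2)) := by
        rw [alignACore]; simp [hab]
      rw [if_neg hab, hA]
      simp only [packE]
      split
      · refine Prod.ext rfl (Prod.ext rfl ?_)
        simp only [compte_cons_left, compte_cons_right]
        by_cases hbd : b = '-' <;> simp [hbd] <;> omega
      · refine Prod.ext rfl (Prod.ext rfl ?_)
        simp only [compte_cons_left, compte_cons_right]
        by_cases had : a = '-' <;> simp [had] <;> omega

lemma tableB_eq (w1 w2 : List Char) :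
    tableB w1 w2 = (List.tails w2).map (fun s => packE (alignACore w1 s)) := by
  induction w1 with
  | nil => simpa [tableB] using baseRowB_eq w2
  | cons a t1 ih => rw [tableB, ih, stepRowB_eq]

-- ===== VERDICT (by name: the statement is the Claim_ definition above) =====
theorem aligne_str_dyn_spec : Claim_equal_aligne_str_dyn := by
  intro w1 w2 _
  obtain ⟨r, hr⟩ := tails_map_head (fun s => packE (alignACore w1.toList s)) w2.toList
  unfold Spec_aligne_str_dyn aligne_str_dyn aligne_str_dyn_alt
  rw [tableB_eq, hr]
  rfl
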